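-- pv_equiv track=rewrite | github.com/tdda/tdda | rexpy/rexpy.py | left_parts
-- ===== SOURCE A (Python) =====
-- from collections import Counter, defaultdict, namedtuple
--
-- def left_parts(patterns, fixed):
--     """
--     patterns is a list of patterns each consisting of a list of frags.
--
--     fixed is a list of (fragment, position) pairs, sorted on position,
--     specifying points at which to split the patterns.
--
--     This function returns a list of lists of pattern fragments,
--     split at each fixed position.
--     """
--     if not fixed:
--         return [patterns]
--     lastPos = -1
--     out = []
--     lstats = length_stats(patterns)
--     for (frag, pos) in fixed:
--         if pos > 0:  # Nothing to the left if it's position 0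
--             out.append([p[lastPos + 1:pos] for p in patterns])
-- #        out.append([p[pos:pos + 1] for p in patterns])  # the fixed bit
--         out.append([[p[pos]] for p in patterns])  # the fixed bit
--         lastPos = pos
--     if lastPos < lstats.max_length - 1:  # the end, if there's anything left
--         out.append([p[lastPos + 1:] for p in patterns])
--     return out
--
-- def length_stats(patterns):
--     """
--     Given a list of patterns, returns named tuple containing
--
--         all_same_length: boolean, True if all patterns are the same length
--         max_length:      length of the longest pattern in patterns
--     """
--     lengths = [len(p) for p in patterns]
--     L0 = lengths[0] if lengths else 0
--     LS = namedtuple('lengthstats', 'all_same_length max_length')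
--     return LS(all(L == L0 for L in lengths), max(lengths) if lengths else 0)
-- ===== SOURCE B (Python) =====
-- def left_parts(patterns, fixed):
--     # B: recursive decomposition -- the output is defined by structural
--     # recursion on fixed (no lastPos accumulator, no post-loop epilogue:
--     # the trailing piece is the base case), consing columns front-to-back.
--     if not fixed:
--         return [patterns]
--     max_length = max((len(p) for p in patterns), default=0)
--
--     def go(fx, last):
--         if not fx:
--             if last < max_length - 1:
--                 return [[p[last + 1:] for p in patterns]]
--             return []
--         (_frag, pos) = fx[0]
--         head = [[p[last + 1:pos] for p in patterns]] if pos > 0 else []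
--         head.append([[p[pos]] for p in patterns])
--         return head + go(fx[1:], pos)
--
--     return go(fixed, -1)
-- ===== Notes on version B (the rewrite author's own statement) =====
-- stated objective: alternative
-- what changed: B defines the result by structural recursion on fixed: each call conses its (optional slice, fixed-index) columns onto the recursion over the remaining cuts, and the trailing piece is the recursion's base case, replacing A's imperative loop with a lastPos accumulator, an out.append list and a post-loop epilogue; Pre_ excludes exactly the inputs where A raises IndexError (a fixed position out of range for some pattern).
import Mathlib
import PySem

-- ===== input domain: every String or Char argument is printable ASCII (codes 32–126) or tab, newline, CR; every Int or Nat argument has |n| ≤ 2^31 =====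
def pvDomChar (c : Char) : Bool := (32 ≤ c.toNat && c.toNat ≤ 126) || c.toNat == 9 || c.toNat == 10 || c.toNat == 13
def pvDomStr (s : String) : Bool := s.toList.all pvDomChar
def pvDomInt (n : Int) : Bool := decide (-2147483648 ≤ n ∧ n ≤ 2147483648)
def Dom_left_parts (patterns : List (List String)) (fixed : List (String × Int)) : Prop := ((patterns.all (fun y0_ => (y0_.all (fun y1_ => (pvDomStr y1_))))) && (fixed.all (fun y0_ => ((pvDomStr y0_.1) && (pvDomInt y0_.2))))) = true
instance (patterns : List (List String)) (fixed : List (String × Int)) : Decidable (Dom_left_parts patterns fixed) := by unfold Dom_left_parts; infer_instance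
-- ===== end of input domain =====

-- B replaces A's imperative loop (lastPos accumulator + out.append + post-loop
-- epilogue) by a structural recursion on fixed whose base case is the trailing
-- piece (objective: alternative decomposition; return value only).

-- ===== PORT A =====
def length_stats (patterns : List (List String)) : Bool × Int :=
  let lengths := patterns.map (fun p => (p.length : Int))
  let L0 : Int := match lengths with | [] => 0 | l :: _ => l
  (lengths.all (fun L => L == L0),
   if lengths.isEmpty then 0 else (PySem.List.max? lengths id).getD 0)

def left_parts (patterns : List (List String)) (fixed : List (String × Int)) : List (List (List String)) :=
  if fixed.isEmpty then [patterns]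
  else
    let lstats := length_stats patterns
    let st := fixed.foldl (fun (st : Int × List (List (List String))) fp =>
      let out1 := if fp.2 > 0 then
          st.2 ++ [patterns.map (fun p => PySem.List.slice p (some (st.1 + 1)) (some fp.2))]
        else st.2
      (fp.2, out1 ++ [patterns.map (fun p => [PySem.List.pyGetD p fp.2 ""])]))
      ((-1 : Int), ([] : List (List (List String))))
    if st.1 < lstats.2 - 1 then
      st.2 ++ [patterns.map (fun p => PySem.List.slice p (some (st.1 + 1)) none)]
    else st.2

-- ===== PORT B =====
-- the inner recursive helper 'go' of Source B (structural recursion on fx)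
def goLP (patterns : List (List String)) (maxLength : Int) :
    List (String × Int) → Int → List (List (List String))
  | [], last =>
    if last < maxLength - 1 then
      [patterns.map (fun p => PySem.List.slice p (some (last + 1)) none)]
    else []
  | fp :: fx, last =>
    (if fp.2 > 0 then
        [patterns.map (fun p => PySem.List.slice p (some (last + 1)) (some fp.2))]
      else [])
    ++ [patterns.map (fun p => [PySem.List.pyGetD p fp.2 ""])]
    ++ goLP patterns maxLength fx fp.2

def left_parts_alt (patterns : List (List String)) (fixed : List (String × Int)) : List (List (List String)) :=
  if fixed.isEmpty then [patterns]
  else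
    let maxLength := PySem.List.maxD (patterns.map (fun p => (p.length : Int))) id 0
    goLP patterns maxLength fixed (-1)

-- ===== PRECONDITION & SPEC =====
-- Pre_ excludes exactly the inputs where A raises IndexError: some fixed
-- position out of range (pos < -len(p) or pos >= len(p)) for some pattern p.
def Pre_left_parts (patterns : List (List String)) (fixed : List (String × Int)) : Prop :=
  ∀ fp ∈ fixed, ∀ p ∈ patterns, -(p.length : Int) ≤ fp.2 ∧ fp.2 < (p.length : Int)
instance (patterns : List (List String)) (fixed : List (String × Int)) : Decidable (Pre_left_parts patterns fixed) := by unfold Pre_left_parts; infer_instance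

def pvWitness_left_parts : List (List String) × (List (String × Int)) :=
  ([["a", "b"], ["c", "d"]], [("a", 1)])

def Spec_left_parts (patterns : List (List String)) (fixed : List (String × Int)) (out : List (List (List String))) : Prop := out = left_parts_alt patterns fixed
instance (patterns : List (List String)) (fixed : List (String × Int)) (out : List (List (List String))) : Decidable (Spec_left_parts patterns fixed out) := by unfold Spec_left_parts; infer_instance

-- ===== CLAIM (what is proved, stated in full; the proofs are below) =====
def Claim_equal_left_parts : Prop := ∀ (patterns : List (List String)) (fixed : List (String × Int)), Dom_left_parts patterns fixed → Pre_left_parts patterns fixed → Spec_left_parts patterns fixed (left_parts patterns fixed)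

-- ===== LEMMAS AND PROOFS =====

-- A's loop from state (last, acc), followed by A's epilogue, equals acc ++ B's recursion
theorem loop_eq_go (patterns : List (List String)) (M : Int) :
    ∀ (fx : List (String × Int)) (last : Int) (acc : List (List (List String))),
    (let st := fx.foldl (fun (st : Int × List (List (List String))) fp =>
        let out1 := if fp.2 > 0 then
            st.2 ++ [patterns.map (fun p => PySem.List.slice p (some (st.1 + 1)) (some fp.2))]
          else st.2
        (fp.2, out1 ++ [patterns.map (fun p => [PySem.List.pyGetD p fp.2 ""])]))
        (last, acc)
     if st.1 < M - 1 then
       st.2 ++ [patterns.map (fun p => PySem.List.slice p (some (st.1 + 1)) none)]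
     else st.2)
    = acc ++ goLP patterns M fx last := by
  intro fx
  induction fx with
  | nil =>
    intro last acc
    simp only [List.foldl_nil, goLP]
    split <;> simp
  | cons fp rest ih =>
    intro last acc
    simp only [List.foldl_cons, goLP]
    rw [ih]
    split <;> simp

-- the two maxima agree
theorem max_eq (patterns : List (List String)) :
    (length_stats patterns).2 = PySem.List.maxD (patterns.map (fun p => (p.length : Int))) id 0 := by
  unfold length_stats PySem.List.maxD
  cases patterns with
  | nil => rfl
  | cons a l => simp

-- ===== VERDICT (by name: the statement is the Claim_ definition above) =====
theorem left_parts_spec : Claim_equal_left_parts := by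
  intro patterns fixed _dom _pre
  show left_parts patterns fixed = left_parts_alt patterns fixed
  unfold left_parts left_parts_alt
  by_cases hf : fixed.isEmpty = true
  · rw [if_pos hf, if_pos hf]
  · rw [if_neg hf, if_neg hf]
    rw [← max_eq]
    simpa using loop_eq_go patterns (length_stats patterns).2 fixed (-1) []
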